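-- pv_equiv track=rewrite | github.com/gerboland/qttt | envs/pure_quantum_board.py | _matching_classical
-- ===== SOURCE A (Python) =====
-- import typing
--
-- def _matching_classical(lst: typing.List[int]) -> bool:
--     """
--     Returns True if list has all equal integer values
--     """
--     for l in lst:
--         if l == 0:
--             return False  # not X,O
--
--     # ok, all have classical value, check they match
--     def all_equal(iterator):
--         iterator = iter(iterator)
--         try:
--             first = next(iterator)
--         except StopIteration:
--             return True
--         return all(first == x for x in iterator)
--
--     return all_equal(lst)
-- ===== SOURCE B (Python) =====
-- import typing
--
-- def _matching_classical(lst: typing.List[int]) -> bool: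
--     """
--     Returns True if list has all equal integer values
--     """
--     if not lst:
--         return True
--     return min(lst) == max(lst) != 0
-- ===== Notes on version B (the rewrite author's own statement) =====
-- stated objective: alternative
-- what changed: Drops the zero-scan loop and the compare-everything-to-first pass; instead judges 'all equal' by the order-theoretic identity min(lst) == max(lst) and the zero ban by that common extremum being nonzero.
import Mathlib
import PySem

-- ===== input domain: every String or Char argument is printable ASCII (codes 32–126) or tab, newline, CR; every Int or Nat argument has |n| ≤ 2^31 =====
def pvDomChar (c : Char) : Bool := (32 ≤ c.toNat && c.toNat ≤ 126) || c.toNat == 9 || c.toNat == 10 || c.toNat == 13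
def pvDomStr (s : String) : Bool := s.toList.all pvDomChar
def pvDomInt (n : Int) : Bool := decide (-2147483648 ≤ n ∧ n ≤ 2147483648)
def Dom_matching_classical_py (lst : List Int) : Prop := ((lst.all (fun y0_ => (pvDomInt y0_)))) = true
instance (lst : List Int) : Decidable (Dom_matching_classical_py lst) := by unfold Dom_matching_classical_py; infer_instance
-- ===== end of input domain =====

-- B replaces A's zero-scan loop + compare-to-first pass with the aggregate test min(lst) == max(lst) != 0 (objective: alternative).

-- ===== PORT A =====
-- the 'for l in lst: if l == 0: return False' loop: some false = early return, none = fell through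
def mcZeroScan : List Int → Option Bool
  | [] => none
  | l :: ls => if l == 0 then some false else mcZeroScan ls

-- the nested all_equal helper: take first (empty → True), then all(first == x for x in rest)
def mcAllEqual (lst : List Int) : Bool :=
  match lst with
  | [] => true
  | first :: rest => rest.all (fun x => first == x)

def matching_classical_py (lst : List Int) : Bool :=
  match mcZeroScan lst with
  | some b => b
  | none => mcAllEqual lst

-- ===== PORT B =====
def matching_classical_py_alt (lst : List Int) : Bool :=
  if lst.isEmpty then true
  else
    -- min(lst) == max(lst) != 0  (chained comparison)
    match PySem.List.min? lst (fun x => x), PySem.List.max? lst (fun x => x) with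
    | some mn, some mx => decide (mn = mx) && decide (mx ≠ 0)
    | _, _ => false

-- ===== PRECONDITION & SPEC =====
def Spec_matching_classical_py (lst : List Int) (out : Bool) : Prop := out = matching_classical_py_alt lst
instance (lst : List Int) (out : Bool) : Decidable (Spec_matching_classical_py lst out) := by unfold Spec_matching_classical_py; infer_instance

-- ===== CLAIM (what is proved, stated in full; the proofs are below) =====
def Claim_equal_matching_classical_py : Prop := ∀ (lst : List Int), Dom_matching_classical_py lst → Spec_matching_classical_py lst (matching_classical_py lst)

-- ===== LEMMAS AND PROOFS =====

theorem mcZeroScan_eq (lst : List Int) :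
    mcZeroScan lst = if 0 ∈ lst then some false else none := by
  induction lst with
  | nil => rfl
  | cons l ls ih =>
    simp only [mcZeroScan, ih, List.mem_cons, beq_iff_eq]
    by_cases h : l = 0 <;> simp [h, eq_comm]

theorem matching_classical_py_eq_true_iff (lst : List Int) :
    matching_classical_py lst = true ↔
      (0 ∉ lst ∧ ∀ x ∈ lst, ∀ y ∈ lst, x = y) := by
  unfold matching_classical_py
  rw [mcZeroScan_eq]
  by_cases h0 : 0 ∈ lst
  · simp [h0]
  · simp only [h0, if_neg, not_false_eq_true, true_and]
    cases lst with
    | nil => simp [mcAllEqual]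
    | cons first rest =>
      simp only [mcAllEqual, List.all_eq_true, beq_iff_eq, List.mem_cons]
      constructor
      · rintro h x (rfl | hx) y (rfl | hy)
        · rfl
        · exact h y hy
        · exact (h x hx).symm
        · exact (h x hx).symm.trans (h y hy)
      · intro h x hx
        exact h first (Or.inl rfl) x (Or.inr hx)

theorem alt_eq_true_iff (lst : List Int) :
    matching_classical_py_alt lst = true ↔
      (0 ∉ lst ∧ ∀ x ∈ lst, ∀ y ∈ lst, x = y) := by
  unfold matching_classical_py_alt
  cases lst with
  | nil => simp
  | cons a t =>
    rw [PySem.List.min?_id_cons, PySem.List.max?_id_cons]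
    have hminle := PySem.List.foldl_min_le t a
    have hlemax := PySem.List.le_foldl_max t a
    have hminmem := PySem.List.foldl_min_mem t a
    have hmaxmem := PySem.List.foldl_max_mem t a
    have hmin_mem : t.foldl min a ∈ a :: t := by
      rcases hminmem with h | h
      · rw [h]; exact List.mem_cons_self
      · exact List.mem_cons_of_mem _ h
    have hmax_mem : t.foldl max a ∈ a :: t := by
      rcases hmaxmem with h | h
      · rw [h]; exact List.mem_cons_self
      · exact List.mem_cons_of_mem _ h
    have hmin : ∀ y ∈ a :: t, t.foldl min a ≤ y := by
      intro y hy
      rcases List.mem_cons.1 hy with rfl | hy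
      · exact hminle.1
      · exact hminle.2 y hy
    have hmax : ∀ y ∈ a :: t, y ≤ t.foldl max a := by
      intro y hy
      rcases List.mem_cons.1 hy with rfl | hy
      · exact hlemax.1
      · exact hlemax.2 y hy
    simp only [List.isEmpty_cons, Bool.false_eq_true, if_false,
      Bool.and_eq_true, decide_eq_true_eq]
    constructor
    · rintro ⟨heq, hnz⟩
      have hall : ∀ x ∈ a :: t, x = t.foldl min a := fun x hx =>
        le_antisymm (heq ▸ hmax x hx) (hmin x hx)
      refine ⟨fun h0 => hnz ((heq ▸ hall 0 h0).symm), fun x hx y hy => (hall x hx).trans (hall y hy).symm⟩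
    · rintro ⟨h0, heq⟩
      have h : t.foldl min a = t.foldl max a := heq _ hmin_mem _ hmax_mem
      exact ⟨h, fun hz => h0 (hz ▸ hmax_mem)⟩

-- ===== VERDICT (by name: the statement is the Claim_ definition above) =====
theorem matching_classical_py_spec : Claim_equal_matching_classical_py := by
  intro lst _
  unfold Spec_matching_classical_py
  rw [Bool.eq_iff_iff, matching_classical_py_eq_true_iff, alt_eq_true_iff]
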